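-- pv_equiv track=rewrite | github.com/GrahamStrickland/tucker_combinatorics | ch02/tests/test_find_euler_cycle.py | is_euler_cycle
-- ===== SOURCE A (Python) =====
-- from typing import List
--
-- def is_euler_cycle(path: List[int], V: List[int], E: List[tuple[int]]) -> bool:
--     # Test for missing vertex in path
--     for vert in V:
--         if vert not in path:
--             return False
--
--     # Test for correctness of cycle
--     for i in range(len(path)-1):
--         edge = (path[i], path[i+1])
--
--         if edge in E:
--             E.remove(edge)
--         elif edge[::-1] in E:
--             E.remove(edge[::-1])
--
--     return not E
-- ===== SOURCE B (Python) =====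
-- def _canon(e):
--     # Canonical key for an undirected edge: order the endpoints.
--     return tuple(sorted(e)) if len(e) == 2 else tuple(e)
--
--
-- def is_euler_cycle(path, V, E):
--     pset = set(path)
--     if any(v not in pset for v in V):
--         return False
--     want = {}
--     for u, w in zip(path, path[1:]):
--         k = _canon((u, w))
--         want[k] = want.get(k, 0) + 1
--     have = {}
--     for e in E:
--         k = _canon(e)
--         have[k] = have.get(k, 0) + 1
--     return all(c <= want.get(k, 0) for k, c in have.items())
-- ===== Notes on version B (the rewrite author's own statement) =====
-- stated objective: faster
-- what changed: Replaces A's per-vertex linear scans of path and per-edge linear membership/remove scans of E by a hash set of path vertices and a one-pass multiset comparison over canonical (sorted) undirected edge keys; B is pure, so A's in-place consumption of E is a side-effect difference only (the equivalence is about the return value).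
import Mathlib
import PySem

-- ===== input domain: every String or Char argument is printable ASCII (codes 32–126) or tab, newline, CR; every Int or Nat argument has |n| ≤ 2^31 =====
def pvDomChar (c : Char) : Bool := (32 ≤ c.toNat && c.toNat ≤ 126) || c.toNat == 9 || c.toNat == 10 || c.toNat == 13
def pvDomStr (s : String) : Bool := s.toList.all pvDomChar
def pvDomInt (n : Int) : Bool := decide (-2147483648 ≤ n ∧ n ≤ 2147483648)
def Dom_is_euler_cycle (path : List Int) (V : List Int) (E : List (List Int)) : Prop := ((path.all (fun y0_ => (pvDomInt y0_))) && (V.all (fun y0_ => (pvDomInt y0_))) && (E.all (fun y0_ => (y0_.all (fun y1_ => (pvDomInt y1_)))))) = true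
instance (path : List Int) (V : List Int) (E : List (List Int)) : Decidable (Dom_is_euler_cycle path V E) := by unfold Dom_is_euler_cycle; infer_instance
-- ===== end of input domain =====

-- B replaces A's quadratic membership/remove scans by a set of path vertices and a one-pass
-- counter comparison over canonical undirected edge keys; A mutates its argument E in place
-- and B does not — the equivalence proved here is about the RETURN value only.


-- ===== PORT A =====
-- one iteration of A's removal loop: 'if edge in E: E.remove(edge) elif edge[::-1] in E: E.remove(edge[::-1])'
def eulerStep (Ecur : List (List Int)) (edge : List Int) : List (List Int) :=
  if Ecur.contains edge then
    match PySem.List.remove? Ecur edge with   -- never none: edge ∈ Ecur was just checked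
    | some E' => E'
    | none => Ecur
  else if Ecur.contains edge.reverse then     -- edge[::-1]
    match PySem.List.remove? Ecur edge.reverse with
    | some E' => E'
    | none => Ecur
  else Ecur

def is_euler_cycle (path : List Int) (V : List Int) (E : List (List Int)) : Bool :=
  -- 'for vert in V: if vert not in path: return False'
  if V.any (fun vert => !path.contains vert) then false
  else
    -- 'for i in range(len(path)-1): …'; both indices are always in range, so getD's default is never used
    ((List.range (path.length - 1)).foldl
      (fun Ecur i => eulerStep Ecur [path.getD i 0, path.getD (i + 1) 0]) E).isEmpty

-- ===== PORT B =====
-- _canon(e): tuple(sorted(e)) for a 2-tuple (= order the endpoints), anything else unchanged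
def eulerCanon (e : List Int) : List Int :=
  match e with
  | [a, b] => if a > b then [b, a] else [a, b]
  | _ => e

def is_euler_cycle_alt (path : List Int) (V : List Int) (E : List (List Int)) : Bool :=
  let pset : PySem.Set Int := PySem.Set.ofList path
  if V.any (fun vert => !(PySem.Set.contains pset vert)) then false
  else
    let pairs := path.zip (path.drop 1)   -- zip(path, path[1:])
    let want : PySem.Dict (List Int) Int :=
      pairs.foldl (fun d p => let k := eulerCanon [p.1, p.2]; d.insert k (d.getD k 0 + 1)) PySem.Dict.empty
    let haveD : PySem.Dict (List Int) Int :=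
      E.foldl (fun d e => let k := eulerCanon e; d.insert k (d.getD k 0 + 1)) PySem.Dict.empty
    haveD.items.all (fun kc => decide (kc.2 ≤ want.getD kc.1 0))

-- ===== PRECONDITION & SPEC =====
def Spec_is_euler_cycle (path : List Int) (V : List Int) (E : List (List Int)) (out : Bool) : Prop := out = is_euler_cycle_alt path V E
instance (path : List Int) (V : List Int) (E : List (List Int)) (out : Bool) : Decidable (Spec_is_euler_cycle path V E out) := by unfold Spec_is_euler_cycle; infer_instance

-- ===== CLAIM (what is proved, stated in full; the proofs are below) =====
def Claim_equal_is_euler_cycle : Prop := ∀ (path : List Int) (V : List Int) (E : List (List Int)), Dom_is_euler_cycle path V E → Spec_is_euler_cycle path V E (is_euler_cycle path V E)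

-- ===== LEMMAS AND PROOFS =====

-- multiplicity of canonical key k among E's edges / among the consecutive pairs ps
def cntE (E : List (List Int)) (k : List Int) : Nat := (E.map eulerCanon).count k
def cntP (ps : List (Int × Int)) (k : List Int) : Nat := (ps.map (fun p => eulerCanon [p.1, p.2])).count k

lemma eulerCanon_swap (a b : Int) : eulerCanon [b, a] = eulerCanon [a, b] := by
  simp only [eulerCanon]
  split_ifs <;>
    first
      | rfl
      | (exfalso; omega)
      | (have hab : a = b := by omega
         subst hab; rfl)

lemma eulerCanon_preimage {x : List Int} {a b : Int} (h : eulerCanon x = eulerCanon [a, b]) :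
    x = [a, b] ∨ x = [b, a] := by
  have hK : eulerCanon [a, b] = [a, b] ∨ eulerCanon [a, b] = [b, a] := by
    simp only [eulerCanon]; split_ifs <;> simp
  match x with
  | [c, d] =>
    have hx : ([c, d] : List Int) = eulerCanon [c, d] ∨ ([c, d] : List Int) = (eulerCanon [c, d]).reverse := by
      simp only [eulerCanon]; split_ifs <;> simp
    rw [h] at hx
    rcases hK with hK | hK <;> rw [hK] at hx <;> simp only [List.reverse_cons, List.reverse_nil,
      List.nil_append, List.cons_append] at hx <;> tauto
  | [] =>
    have h' : ([] : List Int) = eulerCanon [a, b] := h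
    rcases hK with hK | hK <;> rw [hK] at h' <;> simp at h'
  | [c] =>
    have h' : ([c] : List Int) = eulerCanon [a, b] := h
    rcases hK with hK | hK <;> rw [hK] at h' <;> simp at h'
  | c :: d :: e :: t =>
    have h' : (c :: d :: e :: t : List Int) = eulerCanon [a, b] := h
    rcases hK with hK | hK <;> rw [hK] at h' <;> simp at h'

lemma cntE_pos_of_mem {x : List Int} {E : List (List Int)} (h : x ∈ E) :
    0 < cntE E (eulerCanon x) := by
  unfold cntE
  exact List.count_pos_iff.mpr (List.mem_map_of_mem h)

lemma cntE_erase {x : List Int} {E : List (List Int)} (h : x ∈ E) (k : List Int) :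
    cntE E k = cntE (E.erase x) k + (if eulerCanon x = k then 1 else 0) := by
  unfold cntE
  have hp : E.Perm (x :: E.erase x) := List.perm_cons_erase h
  rw [(hp.map eulerCanon).count_eq]
  by_cases hx : eulerCanon x = k
  · simp [hx]
  · simp [hx]

lemma cntE_zero_of_not_mem {a b : Int} {E : List (List Int)}
    (h1 : [a, b] ∉ E) (h2 : [b, a] ∉ E) : cntE E (eulerCanon [a, b]) = 0 := by
  unfold cntE
  rw [List.count_eq_zero]
  intro hmem
  rcases List.mem_map.mp hmem with ⟨x, hx, hcx⟩
  rcases eulerCanon_preimage hcx with rfl | rfl <;> contradiction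

-- the crux: A's removal loop empties E' iff every canonical key's multiplicity in E' is covered by ps
lemma loop_empty_iff (ps : List (Int × Int)) : ∀ (E' : List (List Int)),
    (ps.foldl (fun Ecur p => eulerStep Ecur [p.1, p.2]) E' = []) ↔ (∀ k, cntE E' k ≤ cntP ps k) := by
  induction ps with
  | nil =>
    intro E'
    simp only [List.foldl_nil]
    constructor
    · rintro rfl k; simp [cntE, cntP]
    · intro h
      cases E' with
      | nil => rfl
      | cons x t =>
        exfalso
        have hpos : 0 < cntE (x :: t) (eulerCanon x) := cntE_pos_of_mem List.mem_cons_self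
        have h0 := h (eulerCanon x)
        simp only [cntP, List.map_nil, List.count_nil, Nat.le_zero] at h0
        omega
  | cons p ps ih =>
    intro E'
    rw [List.foldl_cons, ih]
    have hrev : ([p.1, p.2] : List Int).reverse = [p.2, p.1] := by simp
    have hcntP : ∀ k, cntP (p :: ps) k = cntP ps k + (if eulerCanon [p.1, p.2] = k then 1 else 0) := by
      intro k
      by_cases hk : eulerCanon [p.1, p.2] = k
      · simp [cntP, hk]
      · simp [cntP, hk]
    by_cases h1 : ([p.1, p.2] : List Int) ∈ E'
    · have hstep : eulerStep E' [p.1, p.2] = E'.erase [p.1, p.2] := by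
        simp only [eulerStep, PySem.List.remove?_eq_some_erase E' [p.1, p.2] h1]
        simp [h1]
      rw [hstep]
      constructor
      · intro h k
        have := h k; rw [cntE_erase h1 k] at *; rw [hcntP k]; split_ifs at * <;> omega
      · intro h k
        have := h k; rw [cntE_erase h1 k] at this; rw [hcntP k] at this; split_ifs at * <;> omega
    · by_cases h2 : ([p.2, p.1] : List Int) ∈ E'
      · have hstep : eulerStep E' [p.1, p.2] = E'.erase [p.2, p.1] := by
          simp only [eulerStep, hrev, PySem.List.remove?_eq_some_erase E' [p.2, p.1] h2]
          simp [h1, h2]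
        rw [hstep]
        have hc : eulerCanon [p.2, p.1] = eulerCanon [p.1, p.2] := eulerCanon_swap _ _
        constructor
        · intro h k
          have := h k; rw [cntE_erase h2 k, hc] at *; rw [hcntP k]; split_ifs at * <;> omega
        · intro h k
          have := h k; rw [cntE_erase h2 k, hc] at this; rw [hcntP k] at this
          split_ifs at * <;> omega
      · have hstep : eulerStep E' [p.1, p.2] = E' := by
          simp only [eulerStep, hrev]
          simp [h1, h2]
        rw [hstep]
        have hz : cntE E' (eulerCanon [p.1, p.2]) = 0 := cntE_zero_of_not_mem h1 h2
        constructor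
        · intro h k; rw [hcntP k]; exact le_trans (h k) (by omega)
        · intro h k
          have := h k; rw [hcntP k] at this
          by_cases hk : eulerCanon [p.1, p.2] = k
          · rw [← hk, hz]; omega
          · simpa [hk] using this

-- A's index loop enumerates exactly the consecutive pairs
lemma range_map_pairs (path : List Int) :
    (List.range (path.length - 1)).map (fun i => ((path.getD i 0, path.getD (i + 1) 0) : Int × Int))
      = path.zip (path.drop 1) := by
  apply List.ext_getElem
  · simp only [List.length_map, List.length_range, List.length_zip, List.length_drop]
    omega
  · intro i h1 h2
    simp only [List.length_map, List.length_range] at h1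
    have hi : i < path.length := by omega
    have hi1 : i + 1 < path.length := by omega
    simp only [List.getElem_map, List.getElem_range, List.getElem_zip, List.getElem_drop]
    rw [List.getD_eq_getElem path 0 hi, List.getD_eq_getElem path 0 hi1]
    have h1i : 1 + i = i + 1 := Nat.add_comm 1 i
    simp [h1i]

-- A returns true iff the vertex check passes and every key's multiplicity is covered
lemma a_true_iff (path V E) :
    is_euler_cycle path V E = true ↔
      (V.any (fun vert => !path.contains vert) = false ∧
        ∀ k, cntE E k ≤ cntP (path.zip (path.drop 1)) k) := by
  unfold is_euler_cycle
  by_cases hv : V.any (fun vert => !path.contains vert) = true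
  · rw [if_pos hv]
    constructor
    · intro hcontra; exact absurd hcontra (by simp)
    · rintro ⟨hg, -⟩; rw [hv] at hg; cases hg
  · have hv' : V.any (fun vert => !path.contains vert) = false := by
      simpa using hv
    rw [if_neg hv, List.isEmpty_iff]
    have hfold : (List.range (path.length - 1)).foldl
        (fun Ecur i => eulerStep Ecur [path.getD i 0, path.getD (i + 1) 0]) E
        = (path.zip (path.drop 1)).foldl (fun Ecur p => eulerStep Ecur [p.1, p.2]) E := by
      rw [← range_map_pairs path, List.foldl_map]
    rw [hfold, loop_empty_iff]
    simp only [hv', true_and]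

-- B returns true iff the same holds
lemma b_true_iff (path V E) :
    is_euler_cycle_alt path V E = true ↔
      (V.any (fun vert => !path.contains vert) = false ∧
        ∀ k, cntE E k ≤ cntP (path.zip (path.drop 1)) k) := by
  have hvert : (V.any (fun vert => !(PySem.Set.contains (PySem.Set.ofList path) vert)))
      = V.any (fun vert => !path.contains vert) := by
    apply PySem.List.any_congr_mem
    intro v _
    simp [PySem.Set.mem_ofList]
  simp only [is_euler_cycle_alt]
  rw [hvert]
  by_cases hv : V.any (fun vert => !path.contains vert) = true
  · rw [if_pos hv]
    constructor
    · intro hcontra; exact absurd hcontra (by simp)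
    · rintro ⟨hg, -⟩; rw [hv] at hg; cases hg
  · have hv' : V.any (fun vert => !path.contains vert) = false := by simpa using hv
    rw [if_neg hv]
    have hwant : (path.zip (path.drop 1)).foldl
        (fun d p => d.insert (eulerCanon [p.1, p.2]) (d.getD (eulerCanon [p.1, p.2]) 0 + 1))
        PySem.Dict.empty
        = PySem.Dict.counter ((path.zip (path.drop 1)).map (fun p => eulerCanon [p.1, p.2])) := by
      rw [← PySem.Dict.foldl_insert_getD_add_one_eq_counter, List.foldl_map]
    have hhave : E.foldl (fun d e => d.insert (eulerCanon e) (d.getD (eulerCanon e) 0 + 1))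
        PySem.Dict.empty
        = PySem.Dict.counter (E.map eulerCanon) := by
      rw [← PySem.Dict.foldl_insert_getD_add_one_eq_counter, List.foldl_map]
    rw [hwant, hhave]
    simp only [List.all_eq_true, PySem.Dict.items_counter, List.mem_map, PySem.Dict.getD_counter,
      hv', true_and]
    constructor
    · intro h k
      by_cases hk : k ∈ E.map eulerCanon
      · have := h (k, ((E.map eulerCanon).count k : Int))
          ⟨k, by simp [PySem.Set.mem_ofList, hk]⟩
        simp only [decide_eq_true_eq] at this
        exact_mod_cast this
      · simp [cntE, List.count_eq_zero_of_not_mem hk]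
    · rintro h kc ⟨k, hk, rfl⟩
      simp only [decide_eq_true_eq]
      exact_mod_cast h k

-- ===== VERDICT (by name: the statement is the Claim_ definition above) =====
theorem is_euler_cycle_spec : Claim_equal_is_euler_cycle := by
  intro path V E _
  unfold Spec_is_euler_cycle
  rw [Bool.eq_iff_iff, a_true_iff, b_true_iff]
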